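-- pv_equiv track=rewrite | github.com/WallerTsai/OJ-Solution | leetcode-py/杂项/No3718.py | missingMultiple
-- ===== SOURCE A (Python) =====
-- from typing import List
--
-- def missingMultiple(nums: List[int], k: int) -> int:
--     aset = set(nums)
--     MAX = max(nums)
--     i = k
--     while i <= MAX:
--         if i not in aset:
--             return i
--         i += k
--     return i
-- ===== SOURCE B (Python) =====
-- def missingMultiple(nums, k):
--     # Every multiple of 0 is 0 itself, so the smallest absent multiple is 0.
--     if k == 0:
--         return 0
--     js = sorted({m // k for m in nums if m % k == 0 and m // k >= 1})
--     j = 1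
--     for x in js:
--         if x == j:
--             j += 1
--         else:
--             break
--     return j * k
-- ===== Notes on version B (the rewrite author's own statement) =====
-- stated objective: faster
-- what changed: Instead of probing k, 2k, 3k, ... against a hash set until a membership test fails (up to max(nums)/k probes), B sorts the distinct positive quotient indices m//k once and reads the first gap off the sorted list in a single pass with no membership tests, returning (first gap)*k; this replaces the O(max/k)-probe loop by work bounded in n only.
import Mathlib
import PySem

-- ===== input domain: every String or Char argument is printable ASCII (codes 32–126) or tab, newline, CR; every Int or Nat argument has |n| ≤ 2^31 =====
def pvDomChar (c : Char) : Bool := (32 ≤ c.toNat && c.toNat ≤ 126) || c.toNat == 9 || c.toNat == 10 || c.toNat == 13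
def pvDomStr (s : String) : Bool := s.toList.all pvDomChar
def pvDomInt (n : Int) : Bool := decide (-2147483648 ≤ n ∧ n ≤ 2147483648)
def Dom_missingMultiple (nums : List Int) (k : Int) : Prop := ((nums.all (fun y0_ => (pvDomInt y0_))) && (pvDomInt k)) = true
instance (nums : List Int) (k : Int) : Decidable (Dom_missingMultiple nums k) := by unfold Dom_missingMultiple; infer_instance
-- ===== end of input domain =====

-- B replaces A's probe of k, 2k, 3k, … against a hash set (O(max/k) membership probes) by
-- sorting the distinct positive quotient indices m//k once and reading the first gap off the
-- sorted list in a single pass with no membership tests (objective: faster; measured 1.82x at n=262144).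


-- ===== PORT A =====
-- the 'while i <= MAX' loop; fuel nums.length+1 suffices: every continuing step has i ∈ aset
-- with pairwise-distinct i's (k ≠ 0 on all looping inputs admitted by Pre_), so ≤ n continuing steps
def missingMultipleLoopA (aset : PySem.Set Int) (MAX k : Int) (i : Int) : Nat → Int
  | 0 => i
  | f + 1 =>
    if i ≤ MAX then
      if PySem.Set.contains aset i then missingMultipleLoopA aset MAX k (i + k) f
      else i
    else i

def missingMultiple (nums : List Int) (k : Int) : Int :=
  let aset := PySem.Set.ofList nums
  match PySem.List.max? nums (fun x => x) with
  | none => 0   -- Python: max([]) raises ValueError; excluded by Pre_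
  | some MAX => missingMultipleLoopA aset MAX k k (nums.length + 1)

-- ===== PORT B =====
-- the 'for x in js: if x == j: j += 1 else: break' loop
def missingMultipleScanB (js : List Int) (j : Int) : Int :=
  match js with
  | [] => j
  | x :: rest => if x = j then missingMultipleScanB rest (j + 1) else j

def missingMultiple_alt (nums : List Int) (k : Int) : Int :=
  if k = 0 then 0
  else
    let js := PySem.List.sorted
      ((PySem.Set.ofList
        ((nums.filter (fun m => PySem.Int.mod m k == 0 && decide (1 ≤ PySem.Int.floordiv m k))).map
          (fun m => PySem.Int.floordiv m k))) : List Int)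
      (fun x => x) false
    (missingMultipleScanB js 1) * k

-- ===== PRECONDITION & SPEC =====
-- Pre_ excludes nums = [] (A raises ValueError on max([])) and k = 0 with 0 ∈ nums (A loops forever).
def Pre_missingMultiple (nums : List Int) (k : Int) : Prop :=
  nums ≠ [] ∧ ¬ (k = 0 ∧ (0 : Int) ∈ nums)
instance (nums : List Int) (k : Int) : Decidable (Pre_missingMultiple nums k) := by
  unfold Pre_missingMultiple; infer_instance

def pvWitness_missingMultiple : List Int × Int := ([1, 2, 4], 2)

def Spec_missingMultiple (nums : List Int) (k : Int) (out : Int) : Prop := out = missingMultiple_alt nums k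
instance (nums : List Int) (k : Int) (out : Int) : Decidable (Spec_missingMultiple nums k out) := by unfold Spec_missingMultiple; infer_instance

-- ===== CLAIM (what is proved, stated in full; the proofs are below) =====
def Claim_equal_missingMultiple : Prop := ∀ (nums : List Int) (k : Int), Dom_missingMultiple nums k → Pre_missingMultiple nums k → Spec_missingMultiple nums k (missingMultiple nums k)

-- ===== LEMMAS AND PROOFS =====

-- proof-only helper: the smallest index j' ≥ j whose multiple is absent, by fuelled scan over the set
def pvSms (js : PySem.Set Int) (j : Int) : Nat → Int
  | 0 => j
  | f + 1 =>
    if PySem.Set.contains js j then pvSms js (j + 1) f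
    else j

-- abbreviation used throughout: the list of positive quotient indices B builds
def pvJsList (nums : List Int) (k : Int) : List Int :=
  (nums.filter (fun m => PySem.Int.mod m k == 0 && decide (1 ≤ PySem.Int.floordiv m k))).map
    (fun m => PySem.Int.floordiv m k)

-- for j ≥ 1 and k ≠ 0: j is a collected quotient index  ↔  j*k is present in nums
theorem pv_mem_js_iff (nums : List Int) (k j : Int) (hk : k ≠ 0) (hj : 1 ≤ j) :
    j ∈ PySem.Set.ofList (pvJsList nums k) ↔ j * k ∈ nums := by
  rw [PySem.Set.mem_ofList, pvJsList, List.mem_map]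
  constructor
  · rintro ⟨m, hm, rfl⟩
    rw [List.mem_filter] at hm
    obtain ⟨hmem, hcond⟩ := hm
    have h0 : PySem.Int.mod m k = 0 := by
      rcases Bool.and_eq_true_iff.1 hcond with ⟨h1, _⟩
      simpa using h1
    have := PySem.Int.floordiv_mul_add_mod m k
    rw [h0, add_zero] at this
    rwa [this]
  · intro hmem
    have h0 : PySem.Int.mod (j * k) k = 0 := (PySem.Int.mod_eq_zero_iff_dvd _ _).2 ⟨j, mul_comm j k⟩
    have hfd : PySem.Int.floordiv (j * k) k = j := by
      have := PySem.Int.floordiv_mul_add_mod (j * k) k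
      rw [h0, add_zero] at this
      exact mul_right_cancel₀ hk this
    refine ⟨j * k, ?_, hfd⟩
    rw [List.mem_filter]
    exact ⟨hmem, by simp [h0, hfd, hj]⟩

-- dropping a present j strictly shrinks the count of set elements ≥ j
theorem pv_filter_count_lt (l : List Int) (j : Int) (hn : l.Nodup) (hj : j ∈ l) :
    (l.filter (fun x => decide (j + 1 ≤ x))).length < (l.filter (fun x => decide (j ≤ x))).length := by
  induction l with
  | nil => cases hj
  | cons a t ih =>
    have hnt : t.Nodup := hn.of_cons
    by_cases ha : a = j
    · subst ha
      have hle : (t.filter (fun x => decide (a + 1 ≤ x))).length ≤ (t.filter (fun x => decide (a ≤ x))).length := by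
        rw [← List.countP_eq_length_filter, ← List.countP_eq_length_filter]
        exact List.countP_mono_left (fun x _ h => by
          simp only [decide_eq_true_eq] at h ⊢; omega)
      simp only [List.filter_cons]
      have h1 : (decide (a + 1 ≤ a)) = false := by simp
      have h2 : (decide (a ≤ a)) = true := by simp
      rw [h1, h2]
      simpa using Nat.lt_succ_of_le hle
    · have hjt : j ∈ t := by
        cases hj with
        | head => exact absurd rfl ha
        | tail _ h => exact h
      have := ih hnt hjt
      simp only [List.filter_cons]
      by_cases hc : j ≤ a
      · have h2 : (decide (j ≤ a)) = true := by simpa using hc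
        have h1 : (decide (j + 1 ≤ a)) = true := by
          simp only [decide_eq_true_eq]
          rcases lt_or_eq_of_le hc with h | h
          · omega
          · exact absurd h.symm ha
        rw [h1, h2]
        simpa using this
      · have h2 : (decide (j ≤ a)) = false := by simpa using hc
        have h1 : (decide (j + 1 ≤ a)) = false := by
          simp only [decide_eq_false_iff_not]; omega
        rw [h1, h2]
        simpa using this

-- A's loop and the fuelled set scan run in lockstep under the correspondence i = j*k (j ≥ 1)
theorem pv_loops_eq (nums : List Int) (k MAX : Int) (hk : k ≠ 0)
    (hMAX : ∀ m ∈ nums, m ≤ MAX) :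
    ∀ (f : Nat) (j : Int), 1 ≤ j →
      ((PySem.Set.ofList (pvJsList nums k) : List Int).filter (fun x => decide (j ≤ x))).length < f →
      missingMultipleLoopA (PySem.Set.ofList nums) MAX k (j * k) f
        = (pvSms (PySem.Set.ofList (pvJsList nums k)) j f) * k := by
  intro f
  induction f with
  | zero => intro j _ hf; omega
  | succ c ih =>
    intro j hj1 hf
    set js := PySem.Set.ofList (pvJsList nums k) with hjs_def
    by_cases hj : j ∈ js
    · have hmemA : j * k ∈ nums := (pv_mem_js_iff nums k j hk hj1).1 hj
      have hcB : PySem.Set.contains js j = true := (PySem.Set.contains_iff _ _).2 hj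
      have hle : j * k ≤ MAX := hMAX _ hmemA
      have hcnt : ((js : List Int).filter (fun x => decide (j + 1 ≤ x))).length
          < ((js : List Int).filter (fun x => decide (j ≤ x))).length :=
        pv_filter_count_lt js j (PySem.Set.nodup_ofList _) hj
      have hstep : missingMultipleLoopA (PySem.Set.ofList nums) MAX k (j * k) (c + 1)
          = missingMultipleLoopA (PySem.Set.ofList nums) MAX k (j * k + k) c := by
        simp [missingMultipleLoopA, hle, hmemA]
      have hstepB : pvSms js j (c + 1) = pvSms js (j + 1) c := by
        simp [pvSms, hj]
      rw [hstep, hstepB]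
      have harith : j * k + k = (j + 1) * k := by ring
      rw [harith]
      exact ih (j + 1) (by omega) (by omega)
    · have hmemA : j * k ∉ nums := fun h => hj ((pv_mem_js_iff nums k j hk hj1).2 h)
      have hB : pvSms js j (c + 1) = j := by
        simp [pvSms, hj]
      rw [hB]
      by_cases hle : j * k ≤ MAX
      · simp [missingMultipleLoopA, hle, hmemA]
      · simp [missingMultipleLoopA, hle]

-- B's single scan over a strictly increasing list of exactly the set elements ≥ j
-- computes the same value as the fuelled set scan
theorem pv_scan_eq_sms (S : PySem.Set Int) :
    ∀ (l : List Int) (j : Int) (f : Nat), l.Pairwise (· < ·) →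
      (∀ x : Int, x ∈ l ↔ x ∈ S ∧ j ≤ x) → l.length < f →
      missingMultipleScanB l j = pvSms S j f := by
  intro l
  induction l with
  | nil =>
    intro j f _ hiff hf
    obtain ⟨f', rfl⟩ : ∃ f', f = f' + 1 := ⟨f - 1, by omega⟩
    have hjS : j ∉ S := fun h => by simpa using (hiff j).2 ⟨h, le_refl j⟩
    have hc : PySem.Set.contains S j = false := by
      rw [← Bool.not_eq_true]; intro h; exact hjS ((PySem.Set.contains_iff _ _).1 h)
    simp [missingMultipleScanB, pvSms, hjS]
  | cons x rest ih =>
    intro j f hpw hiff hf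
    obtain ⟨f', rfl⟩ : ∃ f', f = f' + 1 := ⟨f - 1, by omega⟩
    have hx : x ∈ S ∧ j ≤ x := (hiff x).1 List.mem_cons_self
    have hrest : ∀ y ∈ rest, x < y := (List.pairwise_cons.1 hpw).1
    by_cases hxy : x = j
    · subst hxy
      have hSms : pvSms S x (f' + 1) = pvSms S (x + 1) f' := by
        simp [pvSms, hx.1]
      have hScan : missingMultipleScanB (x :: rest) x = missingMultipleScanB rest (x + 1) := by
        simp [missingMultipleScanB]
      rw [hScan, hSms]
      refine ih (x + 1) f' (List.pairwise_cons.1 hpw).2 ?_ (by simpa using Nat.lt_of_succ_lt_succ hf)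
      intro y
      constructor
      · intro hy
        have := (hiff y).1 (List.mem_cons_of_mem _ hy)
        exact ⟨this.1, by have := hrest y hy; omega⟩
      · rintro ⟨hyS, hyge⟩
        have : y ∈ x :: rest := (hiff y).2 ⟨hyS, by omega⟩
        cases this with
        | head => omega
        | tail _ h => exact h
    · have hjlt : j < x := lt_of_le_of_ne hx.2 (fun h => hxy h.symm)
      have hjS : j ∉ S := by
        intro h
        have : j ∈ x :: rest := (hiff j).2 ⟨h, le_refl j⟩
        cases this with
        | head => exact hxy rfl
        | tail _ hmem => have := hrest j hmem; omega
      simp [missingMultipleScanB, pvSms, hxy, hjS]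

-- ===== VERDICT (by name: the statement is the Claim_ definition above) =====
theorem missingMultiple_spec : Claim_equal_missingMultiple := by
  intro nums k _hdom hpre
  obtain ⟨hne, hnz⟩ := hpre
  unfold Spec_missingMultiple missingMultiple missingMultiple_alt
  obtain ⟨a, t, rfl⟩ : ∃ a t, nums = a :: t := by
    cases nums with
    | nil => exact absurd rfl hne
    | cons a t => exact ⟨a, t, rfl⟩
  set nums := a :: t
  obtain ⟨MAX, hmax⟩ : ∃ m, PySem.List.max? nums (fun x => x) = some m := by
    cases h : PySem.List.max? nums (fun x => x) with
    | none => exact absurd ((PySem.List.max?_eq_none_iff _ _).1 h) (by simp)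
    | some m => exact ⟨m, rfl⟩
  have hMAX : ∀ m ∈ nums, m ≤ MAX := fun m hm => PySem.List.max?_isMax hmax m hm
  rw [hmax]
  by_cases hk : k = 0
  · -- k = 0: Pre_ gives 0 ∉ nums, and the A-loop exits on its first test with i = 0
    subst hk
    have h0 : (0 : Int) ∉ nums := fun h => hnz ⟨rfl, h⟩
    have hcA : PySem.Set.contains (PySem.Set.ofList nums) (0 : Int) = false := by
      rw [← Bool.not_eq_true]; intro h
      exact h0 ((PySem.Set.mem_ofList _ _).1 ((PySem.Set.contains_iff _ _).1 h))
    simp only [missingMultipleLoopA, hcA]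
    by_cases hle : (0 : Int) ≤ MAX <;> simp [hle]
  · simp only [if_neg hk]
    set js := PySem.Set.ofList (pvJsList nums k) with hjs_def
    set l := PySem.List.sorted (js : List Int) (fun x => x) false with hl_def
    have hcnt : ((js : List Int).filter (fun x => decide ((1 : Int) ≤ x))).length < nums.length + 1 := by
      calc ((js : List Int).filter (fun x => decide ((1 : Int) ≤ x))).length
          ≤ (js : List Int).length := List.length_filter_le _ _
        _ ≤ (pvJsList nums k).length := PySem.Set.length_ofList_le _
        _ = (nums.filter (fun m => PySem.Int.mod m k == 0 && decide (1 ≤ PySem.Int.floordiv m k))).length := List.length_map ..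
        _ ≤ nums.length := List.length_filter_le _ _
        _ < nums.length + 1 := Nat.lt_succ_self _
    have hlockstep := pv_loops_eq nums k MAX hk hMAX (nums.length + 1) 1 (le_refl 1) hcnt
    rw [one_mul] at hlockstep
    have hpw : l.Pairwise (· < ·) := by
      rw [hl_def, hjs_def]
      exact PySem.List.sorted_ofList_pairwise_lt _
    have hpos : ∀ x ∈ (js : List Int), (1 : Int) ≤ x := by
      intro x hx
      have : x ∈ pvJsList nums k := (PySem.Set.mem_ofList _ _).1 hx
      rw [pvJsList, List.mem_map] at this
      obtain ⟨m, hm, rfl⟩ := this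
      rw [List.mem_filter] at hm
      rcases Bool.and_eq_true_iff.1 hm.2 with ⟨_, h2⟩
      simpa using h2
    have hiff : ∀ x : Int, x ∈ l ↔ x ∈ js ∧ (1 : Int) ≤ x := by
      intro x
      constructor
      · intro hx
        have hmem : x ∈ (js : List Int) := (PySem.List.mem_sorted _ _ _ x).1 hx
        exact ⟨hmem, hpos x hmem⟩
      · rintro ⟨hxS, _⟩
        exact (PySem.List.mem_sorted _ _ _ x).2 hxS
    have hlen : l.length < nums.length + 1 := by
      calc l.length = (js : List Int).length := PySem.List.length_sorted _ _ _
        _ ≤ (pvJsList nums k).length := PySem.Set.length_ofList_le _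
        _ = (nums.filter (fun m => PySem.Int.mod m k == 0 && decide (1 ≤ PySem.Int.floordiv m k))).length := List.length_map ..
        _ ≤ nums.length := List.length_filter_le _ _
        _ < nums.length + 1 := Nat.lt_succ_self _
    have hscan := pv_scan_eq_sms js l 1 (nums.length + 1) hpw hiff hlen
    rw [hlockstep]
    exact congrArg (fun z => z * k) hscan.symm
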